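-- pv_equiv track=rewrite | github.com/Beach-Box/Perfumery-Dashboard | scripts/inspect_source_document_pdfs.py | collect_keyword_lines
-- ===== SOURCE A (Python) =====
-- def unique_list(values):
--     seen = set()
--     output = []
--     for value in values:
--       if value is None:
--           continue
--       text = str(value).strip()
--       if not text or text in seen:
--           continue
--       seen.add(text)
--       output.append(text)
--     return output
--
-- def collect_keyword_lines(lines, keywords):
--     keywords_lower = [keyword.lower() for keyword in keywords]
--     matches = []
--     for line in lines:
--         lower = line.lower()
--         if any(keyword in lower for keyword in keywords_lower):
--             matches.append(line)
--     return unique_list(matches)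
-- ===== SOURCE B (Python) =====
-- def collect_keyword_lines(lines, keywords):
--     keywords_lower = [keyword.lower() for keyword in keywords]
--     seen = set()
--     output = []
--     for line in lines:
--         lower = line.lower()
--         if any(keyword in lower for keyword in keywords_lower):
--             text = str(line).strip()
--             if text and text not in seen:
--                 seen.add(text)
--                 output.append(text)
--     return output
-- ===== Notes on version B (the rewrite author's own statement) =====
-- stated objective: simpler
-- what changed: Fuses A's two passes (filter into an intermediate 'matches' list, then a separate unique_list helper) into a single loop that filters, strips and dedupes each line in one traversal, dropping the helper and the intermediate list.
import Mathlib
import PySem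

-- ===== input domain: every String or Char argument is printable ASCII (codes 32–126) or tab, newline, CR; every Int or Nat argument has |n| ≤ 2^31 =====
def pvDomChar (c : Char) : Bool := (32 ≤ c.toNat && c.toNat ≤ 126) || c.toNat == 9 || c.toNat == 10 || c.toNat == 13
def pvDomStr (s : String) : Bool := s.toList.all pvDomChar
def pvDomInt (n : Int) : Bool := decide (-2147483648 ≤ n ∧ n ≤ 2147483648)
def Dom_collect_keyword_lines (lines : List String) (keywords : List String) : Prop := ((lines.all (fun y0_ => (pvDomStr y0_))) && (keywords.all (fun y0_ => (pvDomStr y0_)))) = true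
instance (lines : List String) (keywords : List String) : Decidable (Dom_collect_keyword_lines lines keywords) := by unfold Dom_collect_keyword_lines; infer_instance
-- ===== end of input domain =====

-- B fuses A's two passes (filter to an intermediate list, then the unique_list dedup helper) into one loop; objective: simpler (same cost).


-- ===== PORT A =====
def unique_list (values : List String) : List String :=
  -- Python's 'if value is None: continue' branch is unreachable for List String inputs
  (values.foldl (fun (st : PySem.Set String × List String) value =>
      let text := PySem.Str.strip value
      if text = "" || st.1.contains text then st
      else (st.1.add text, st.2 ++ [text]))
    (PySem.Set.empty, [])).2

def collect_keyword_lines (lines : List String) (keywords : List String) : List String :=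
  let keywords_lower := keywords.map PySem.Str.lower
  let matched := lines.foldl (fun acc line =>
    let lower := PySem.Str.lower line
    if keywords_lower.any (fun keyword => PySem.Str.isIn keyword lower) then acc ++ [line]
    else acc) []
  unique_list matched

-- ===== PORT B =====
def collect_keyword_lines_alt (lines : List String) (keywords : List String) : List String :=
  let keywords_lower := keywords.map PySem.Str.lower
  (lines.foldl (fun (st : PySem.Set String × List String) line =>
      let lower := PySem.Str.lower line
      if keywords_lower.any (fun keyword => PySem.Str.isIn keyword lower) then
        let text := PySem.Str.strip line
        if text = "" || st.1.contains text then st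
        else (st.1.add text, st.2 ++ [text])
      else st)
    (PySem.Set.empty, [])).2

-- ===== PRECONDITION & SPEC =====
def Spec_collect_keyword_lines (lines : List String) (keywords : List String) (out : List String) : Prop := out = collect_keyword_lines_alt lines keywords
instance (lines : List String) (keywords : List String) (out : List String) : Decidable (Spec_collect_keyword_lines lines keywords out) := by unfold Spec_collect_keyword_lines; infer_instance

-- ===== CLAIM (what is proved, stated in full; the proofs are below) =====
def Claim_equal_collect_keyword_lines : Prop := ∀ (lines : List String) (keywords : List String), Dom_collect_keyword_lines lines keywords → Spec_collect_keyword_lines lines keywords (collect_keyword_lines lines keywords)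

-- ===== LEMMAS AND PROOFS =====

-- ===== VERDICT (by name: the statement is the Claim_ definition above) =====
theorem collect_keyword_lines_spec : Claim_equal_collect_keyword_lines := by
  intro lines keywords _
  unfold Spec_collect_keyword_lines collect_keyword_lines collect_keyword_lines_alt unique_list
  simp only [PySem.List.foldl_append_if_eq_filter, List.nil_append, List.foldl_filter]
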